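-- pv_equiv track=rewrite | github.com/ChandruMIT-o/Tournament-of-Strategies-MIT | strategies/kemomachi.py | kemomachi
-- ===== SOURCE A (Python) =====
-- def kemomachi(own, opp):
--
--     def alternating_booleans(length):
--       true_block = 10
--       false_block = 5
--       result = []
--       cycle = 0
--       while len(result) < length:
--
--         result.extend([True] * true_block)
--
--         result.extend([False] * (false_block + cycle))
--
--         true_block, false_block = false_block, true_block
--
--       return result[:length]
--
--     length = len(own)
--
--     return alternating_booleans(length+1)[-1]
-- ===== SOURCE B (Python) =====
-- def kemomachi(own, opp):
--     # The loop in A emits a periodic pattern of period 30: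
--     # 10 True, 5 False, 5 True, 10 False.  Read it off by modular arithmetic.
--     r = len(own) % 30
--     return r < 10 or 15 <= r < 20
-- ===== Notes on version B (the rewrite author's own statement) =====
-- stated objective: faster
-- what changed: A materialises the whole boolean list up to len(own)+1 by looping; B observes the pattern has period 30 (10 True, 5 False, 5 True, 10 False) and computes the answer from len(own) % 30 in constant time.
import Mathlib
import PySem

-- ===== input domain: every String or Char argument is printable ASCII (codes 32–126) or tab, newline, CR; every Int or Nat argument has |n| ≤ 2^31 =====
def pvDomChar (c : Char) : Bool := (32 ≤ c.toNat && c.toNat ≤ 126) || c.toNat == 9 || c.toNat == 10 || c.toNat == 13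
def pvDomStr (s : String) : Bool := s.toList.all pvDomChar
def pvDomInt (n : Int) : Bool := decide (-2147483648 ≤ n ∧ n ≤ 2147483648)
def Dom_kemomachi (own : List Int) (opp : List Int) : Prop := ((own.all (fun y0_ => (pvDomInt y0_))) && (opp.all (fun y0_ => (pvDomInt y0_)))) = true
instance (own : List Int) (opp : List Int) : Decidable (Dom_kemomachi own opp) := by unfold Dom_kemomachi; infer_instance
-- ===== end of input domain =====

-- B replaces A's list-building loop by a direct period-30 modular lookup (O(1) vs O(n)).

-- ===== PORT A =====
-- the 'while len(result) < length' loop of alternating_booleans; the proof argument h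
-- (always trivially true at every call: the blocks are 10/5) only justifies termination
def kemoLoop (length : Nat) (true_block false_block cycle : Nat)
    (h : 0 < true_block + false_block + cycle) (result : List Bool) : List Bool :=
  if result.length < length then
    kemoLoop length false_block true_block cycle (by omega)
      (result ++ List.replicate true_block true ++ List.replicate (false_block + cycle) false)
  else result
termination_by length - result.length
decreasing_by simp only [List.length_append, List.length_replicate]; omega

def kemomachi (own : List Int) (opp : List Int) : Bool :=
  let length := own.length
  -- alternating_booleans(length+1) = loop then result[:length+1]
  let res := PySem.List.slice (kemoLoop (length + 1) 10 5 0 (by omega) [])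
      none (some ((length : Int) + 1))
  -- [-1]; the list is never empty (it holds at least length+1 ≥ 1 elements), default unreachable
  (PySem.List.pyGet? res (-1)).getD false

-- ===== PORT B =====
def kemomachi_alt (own : List Int) (opp : List Int) : Bool :=
  let r := own.length % 30
  decide (r < 10 ∨ (15 ≤ r ∧ r < 20))

-- ===== PRECONDITION & SPEC =====
def Spec_kemomachi (own : List Int) (opp : List Int) (out : Bool) : Prop := out = kemomachi_alt own opp
instance (own : List Int) (opp : List Int) (out : Bool) : Decidable (Spec_kemomachi own opp out) := by unfold Spec_kemomachi; infer_instance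

-- ===== CLAIM (what is proved, stated in full; the proofs are below) =====
def Claim_equal_kemomachi : Prop := ∀ (own : List Int) (opp : List Int), Dom_kemomachi own opp → Spec_kemomachi own opp (kemomachi own opp)

-- ===== LEMMAS AND PROOFS =====

/-- the value at position n of A's infinite pattern (period 30) -/
def pat (n : Nat) : Bool := decide (n % 30 < 10 ∨ (15 ≤ n % 30 ∧ n % 30 < 20))

/-- the first m values of the pattern -/
def patPrefix (m : Nat) : List Bool := (List.range m).map pat

@[simp] theorem patPrefix_length (m : Nat) : (patPrefix m).length = m := by
  simp [patPrefix]

theorem pat_mod (k i : Nat) : pat (15 * k + i) = pat (15 * (k % 2) + i) := by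
  unfold pat
  have : (15 * k + i) % 30 = (15 * (k % 2) + i) % 30 := by omega
  rw [this]

theorem kemoLoop_congr (L tb tb' fb fb' : Nat) (h : 0 < tb + fb + 0) (h' : 0 < tb' + fb' + 0)
    (r r' : List Bool) (e1 : tb = tb') (e2 : fb = fb') (e3 : r = r') :
    kemoLoop L tb fb 0 h r = kemoLoop L tb' fb' 0 h' r' := by
  subst e1; subst e2; subst e3; rfl

theorem step (k : Nat) :
    patPrefix (15 * k) ++ List.replicate (if k % 2 = 0 then 10 else 5) true
      ++ List.replicate ((if k % 2 = 0 then 5 else 10) + 0) false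
    = patPrefix (15 * (k + 1)) := by
  have hsplit : patPrefix (15 * (k + 1)) =
      patPrefix (15 * k) ++ (List.range 15).map (fun i => pat (15 * k + i)) := by
    have : 15 * (k + 1) = 15 * k + 15 := by ring
    rw [this]
    simp [patPrefix, List.range_add, List.map_map, Function.comp]
  rw [hsplit, List.append_assoc]
  congr 1
  have hc : ∀ i ∈ List.range 15, pat (15 * k + i) = pat (15 * (k % 2) + i) := by
    intro i _; exact pat_mod k i
  rw [List.map_congr_left hc]
  rcases Nat.mod_two_eq_zero_or_one k with hk | hk <;> rw [hk] <;> decide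

theorem loop_inv : ∀ (fuel L k : Nat)
    (h : 0 < (if k % 2 = 0 then 10 else 5) + (if k % 2 = 0 then 5 else 10) + 0),
    L ≤ 15 * k + fuel →
    ∃ m, L ≤ m ∧
      kemoLoop L (if k % 2 = 0 then 10 else 5) (if k % 2 = 0 then 5 else 10) 0 h
        (patPrefix (15 * k)) = patPrefix m := by
  intro fuel
  induction fuel with
  | zero =>
    intro L k h hL
    refine ⟨15 * k, by omega, ?_⟩
    rw [kemoLoop, if_neg (by simp; omega)]
  | succ n ih =>
    intro L k h hL
    by_cases hlt : (patPrefix (15 * k)).length < L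
    · rw [kemoLoop, if_pos hlt]
      have e1 : (if k % 2 = 0 then 5 else 10) = (if (k + 1) % 2 = 0 then 10 else 5) := by
        rcases Nat.mod_two_eq_zero_or_one k with hk | hk <;> simp [hk, Nat.add_mod]
      have e2 : (if k % 2 = 0 then 10 else 5) = (if (k + 1) % 2 = 0 then 5 else 10) := by
        rcases Nat.mod_two_eq_zero_or_one k with hk | hk <;> simp [hk, Nat.add_mod]
      have h' : 0 < (if (k + 1) % 2 = 0 then 10 else 5) + (if (k + 1) % 2 = 0 then 5 else 10) + 0 := by
        split_ifs <;> omega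
      have hcall := kemoLoop_congr L
        (if k % 2 = 0 then 5 else 10) (if (k + 1) % 2 = 0 then 10 else 5)
        (if k % 2 = 0 then 10 else 5) (if (k + 1) % 2 = 0 then 5 else 10)
        (by omega) h'
        (patPrefix (15 * k) ++ List.replicate (if k % 2 = 0 then 10 else 5) true
          ++ List.replicate ((if k % 2 = 0 then 5 else 10) + 0) false)
        (patPrefix (15 * (k + 1)))
        e1 e2 (step k)
      rw [hcall]
      exact ih L (k + 1) h' (by omega)
    · rw [kemoLoop, if_neg hlt]
      simp only [patPrefix_length] at hlt
      exact ⟨15 * k, by omega, rfl⟩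

-- ===== VERDICT (by name: the statement is the Claim_ definition above) =====
theorem kemomachi_spec : Claim_equal_kemomachi := by
  intro own opp _
  unfold Spec_kemomachi kemomachi kemomachi_alt
  set n := own.length with hn
  have h0 : 0 < (if 0 % 2 = 0 then 10 else 5) + (if 0 % 2 = 0 then 5 else 10) + 0 := by decide
  obtain ⟨m, hm, heq⟩ := loop_inv (n + 1) (n + 1) 0 h0 (by omega)
  have hstart : kemoLoop (n + 1) 10 5 0 (by omega) [] = patPrefix m := by
    rw [← heq]
    exact kemoLoop_congr _ _ _ _ _ _ _ _ _ (by decide) (by decide) (by decide)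
  simp only [hstart]
  have hcast : ((n : Int) + 1) = ((n + 1 : Nat) : Int) := by push_cast; ring
  rw [hcast, PySem.List.slice_to_natCast]
  have htake : (patPrefix m).take (n + 1) = patPrefix (n + 1) := by
    have hmin : min (n + 1) m = n + 1 := by omega
    simp only [patPrefix, ← List.map_take, List.take_range, hmin]
  rw [htake]
  have hsplit : patPrefix (n + 1) = patPrefix n ++ [pat n] := by
    simp [patPrefix, List.range_succ]
  rw [hsplit, PySem.List.pyGet?_neg_one_append_singleton]
  rfl
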